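-- pv_equiv track=rewrite | github.com/Galym-Satybaldin/PP2_labs | PP2/lab_5/04.py | find_upper_lower_sequences
-- ===== SOURCE A (Python) =====
-- def find_upper_lower_sequences(string):
--     # List to store valid sequences
--     valid_sequences = []
--
--     # Current sequence being built
--     current = ''
--
--     # Loop through each character in the string
--     for i in range(len(string)):
--         # If first char of sequence, must be uppercase
--         if not current and string[i].isupper():
--             current = string[i]
--
--         # If we have an uppercase start, check for lowercase
--         elif current and string[i].islower():
--             current += string[i]
--
--         # If we hit an uppercase and have a sequence, save it
--         elif current and string[i].isupper():
--             if len(current) > 1:  # Must have at least one lowercase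
--                 valid_sequences.append(current)
--             current = string[i]
--
--         # If non-letter or wrong case, reset
--         else:
--             if current and len(current) > 1:
--                 valid_sequences.append(current)
--             current = ''
--
--     # Check if last sequence is valid
--     if current and len(current) > 1:
--         valid_sequences.append(current)
--
--     return valid_sequences
-- ===== SOURCE B (Python) =====
-- def find_upper_lower_sequences(string):
--     # Two-pass approach: first group the string into maximal runs of equal
--     # character class (upper / lower / other), then pair each lowercase run
--     # with the last character of an immediately preceding uppercase run.
--     def cls(c):
--         if c.isupper():
--             return 'U'
--         if c.islower():
--             return 'L'
--         return 'O'
--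
--     # Pass 1: maximal runs of equal class (hand-written groupby).
--     runs = []
--     i = 0
--     n = len(string)
--     while i < n:
--         k = cls(string[i])
--         j = i + 1
--         while j < n and cls(string[j]) == k:
--             j += 1
--         runs.append((k, string[i:j]))
--         i = j
--
--     # Pass 2: adjacency pairing over the runs.
--     result = []
--     prev_cls, prev_last = 'O', ' '
--     for k, run in runs:
--         if k == 'L' and prev_cls == 'U':
--             result.append(prev_last + run)
--         prev_cls, prev_last = k, run[-1]
--     return result
-- ===== Notes on version B (the rewrite author's own statement) =====
-- stated objective: alternative
-- what changed: Replaces A's incremental character-by-character state machine (a growing 'current' buffer with four branches) by a two-pass decomposition: first build the maximal runs of equal character class (a hand-written groupby), then a pairing pass over adjacent runs that emits last-char-of-uppercase-run + lowercase-run.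
import Mathlib
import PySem

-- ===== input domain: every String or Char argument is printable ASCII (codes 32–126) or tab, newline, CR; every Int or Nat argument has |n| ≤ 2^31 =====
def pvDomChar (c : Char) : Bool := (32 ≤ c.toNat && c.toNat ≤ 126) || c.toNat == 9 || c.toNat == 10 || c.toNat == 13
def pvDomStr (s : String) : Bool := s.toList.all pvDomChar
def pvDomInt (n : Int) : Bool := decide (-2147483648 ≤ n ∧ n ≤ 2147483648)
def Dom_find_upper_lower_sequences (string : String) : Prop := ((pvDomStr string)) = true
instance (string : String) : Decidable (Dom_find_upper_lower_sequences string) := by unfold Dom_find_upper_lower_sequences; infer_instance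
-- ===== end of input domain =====

-- B replaces A's incremental four-branch state machine by a two-pass decomposition
-- (maximal class runs, then an adjacency-pairing pass over the runs); same cost, alternative structure.

-- ===== PORT A =====
-- A's loop body: the four branches in Python's order; 'current' is kept as a List Char
-- (Python builds it as a string by +=; String.ofList converts on append to the result).
def pvStepA (st : List String × List Char) (c : Char) : List String × List Char :=
  if st.2.isEmpty && PySem.Chars.isupper c then (st.1, [c])
  else if !st.2.isEmpty && PySem.Chars.islower c then (st.1, st.2 ++ [c])
  else if !st.2.isEmpty && PySem.Chars.isupper c then
    (if st.2.length > 1 then st.1 ++ [String.ofList st.2] else st.1, [c])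
  else
    (if !st.2.isEmpty && st.2.length > 1 then st.1 ++ [String.ofList st.2] else st.1, [])

-- A's final check after the loop.
def pvFinA (st : List String × List Char) : List String :=
  if !st.2.isEmpty && st.2.length > 1 then st.1 ++ [String.ofList st.2] else st.1

def find_upper_lower_sequences (string : String) : List String :=
  pvFinA (string.toList.foldl pvStepA ([], []))

-- ===== PORT B =====
-- Source B's cls(c)
def pvCls (c : Char) : Char :=
  if PySem.Chars.isupper c then 'U' else if PySem.Chars.islower c then 'L' else 'O'

-- Source B pass 1: maximal runs of equal class (the hand-written groupby; the inner
-- 'while j < n and cls(string[j]) == k' is the takeWhile/dropWhile split).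
def pvRuns (l : List Char) : List (Char × List Char) :=
  match l with
  | [] => []
  | c :: cs =>
    (pvCls c, c :: cs.takeWhile (fun d => pvCls d == pvCls c)) ::
      pvRuns (cs.dropWhile (fun d => pvCls d == pvCls c))
termination_by l.length
decreasing_by exact Nat.lt_succ_of_le (List.length_dropWhile_le _ _)

-- Source B pass 2: pairing loop over the runs with (prev_cls, prev_last) state;
-- run[-1] is getLastD ' ' (every run produced by pass 1 is nonempty).
def pvPairs (pc : Char) (pl : Char) (rs : List (Char × List Char)) : List String :=
  match rs with
  | [] => []
  | (k, run) :: rs' =>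
    (if k == 'L' && pc == 'U' then [String.ofList (pl :: run)] else []) ++
      pvPairs k (run.getLastD ' ') rs'

def find_upper_lower_sequences_alt (string : String) : List String :=
  pvPairs 'O' ' ' (pvRuns string.toList)

-- ===== PRECONDITION & SPEC =====
def Spec_find_upper_lower_sequences (string : String) (out : List String) : Prop := out = find_upper_lower_sequences_alt string
instance (string : String) (out : List String) : Decidable (Spec_find_upper_lower_sequences string out) := by unfold Spec_find_upper_lower_sequences; infer_instance

-- ===== CLAIM (what is proved, stated in full; the proofs are below) =====
def Claim_equal_find_upper_lower_sequences : Prop := ∀ (string : String), Dom_find_upper_lower_sequences string → Spec_find_upper_lower_sequences string (find_upper_lower_sequences string)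

-- ===== LEMMAS AND PROOFS =====

-- ASCII class facts
theorem pv_upper_not_lower (c : Char) (h : PySem.Chars.isupper c = true) :
    PySem.Chars.islower c = false := by
  simp [PySem.Chars.isupper, PySem.Chars.islower, Char.le_def,
    UInt32.le_iff_toNat_le] at *
  omega

theorem pv_lower_not_upper (c : Char) (h : PySem.Chars.islower c = true) :
    PySem.Chars.isupper c = false := by
  simp [PySem.Chars.isupper, PySem.Chars.islower, Char.le_def,
    UInt32.le_iff_toNat_le] at *
  omega

theorem pvCls_upper (c : Char) (h : PySem.Chars.isupper c = true) : pvCls c = 'U' := by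
  simp [pvCls, h]

theorem pvCls_lower (c : Char) (h : PySem.Chars.islower c = true) : pvCls c = 'L' := by
  simp [pvCls, pv_lower_not_upper c h, h]

theorem pvCls_other (c : Char) (hU : PySem.Chars.isupper c = false)
    (hL : PySem.Chars.islower c = false) : pvCls c = 'O' := by
  simp [pvCls, hU, hL]

-- the run predicate for class 'L' is exactly islower (and for 'U' exactly isupper)
theorem pv_pred_L : (fun d => pvCls d == 'L') = PySem.Chars.islower := by
  funext d
  by_cases hU : PySem.Chars.isupper d = true
  · simp [pvCls_upper d hU, pv_upper_not_lower d hU]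
  · by_cases hL : PySem.Chars.islower d = true
    · simp [pvCls_lower d hL, hL]
    · simp [pvCls_other d (by simpa using hU) (by simpa using hL)]
      simpa using hL

theorem pv_pred_U : (fun d => pvCls d == 'U') = PySem.Chars.isupper := by
  funext d
  by_cases hU : PySem.Chars.isupper d = true
  · simp [pvCls_upper d hU, hU]
  · by_cases hL : PySem.Chars.islower d = true
    · simp [pvCls_lower d hL]
      simpa using hU
    · simp [pvCls_other d (by simpa using hU) (by simpa using hL)]
      simpa using hU

-- the tail of pvPairs forgets prev_last whenever prev_cls ≠ 'U'
theorem pv_pairs_indep (rs : List (Char × List Char)) (pc pc' pl pl' : Char)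
    (h : pc ≠ 'U') (h' : pc' ≠ 'U') : pvPairs pc pl rs = pvPairs pc' pl' rs := by
  cases rs with
  | nil => rfl
  | cons p rs' =>
    obtain ⟨k, run⟩ := p
    simp [pvPairs, h, h']

-- consuming an uppercase head char: the pending uppercase becomes c
theorem pv_upper_step (c : Char) (cs : List Char) (pc pl : Char)
    (h : PySem.Chars.isupper c = true) :
    pvPairs pc pl (pvRuns (c :: cs)) = pvPairs 'U' c (pvRuns cs) := by
  cases cs with
  | nil => simp [pvRuns, pvPairs, pvCls_upper c h]
  | cons d cs₂ =>
    by_cases hd : PySem.Chars.isupper d = true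
    · rw [pvRuns, pvRuns]
      simp only [pvCls_upper c h, pvCls_upper d hd, pv_pred_U, List.takeWhile_cons, hd,
        List.dropWhile_cons]
      simp [pvPairs]
    · rw [pvRuns]
      simp only [pvCls_upper c h, pv_pred_U, List.takeWhile_cons, List.dropWhile_cons, hd]
      simp [pvPairs]

-- consuming a head char that pairs with nothing (class ≠ 'U', and not the
-- lowercase-after-uppercase case): no output, state resets to 'O'
theorem pv_skip (c : Char) (cs : List Char) (pc pl : Char)
    (hne : pvCls c ≠ 'U') (hem : pvCls c = 'L' → pc ≠ 'U') :
    pvPairs pc pl (pvRuns (c :: cs)) = pvPairs 'O' ' ' (pvRuns cs) := by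
  have hemit : ((pvCls c == 'L') && (pc == 'U')) = false := by
    by_cases hL : pvCls c = 'L'
    · simp [hL, hem hL]
    · simp [hL]
  cases cs with
  | nil => simp [pvRuns, pvPairs, hemit]
  | cons d cs₂ =>
    by_cases hd : pvCls d = pvCls c
    · rw [pvRuns, pvRuns]
      simp only [List.takeWhile_cons, List.dropWhile_cons, hd, beq_self_eq_true]
      simp only [pvPairs, hemit]
      have hemit' : ((pvCls c == 'L') && ('O' == 'U')) = false := by simp
      simp
    · rw [pvRuns]
      have hdb : (pvCls d == pvCls c) = false := by simpa using hd
      simp only [List.takeWhile_cons, List.dropWhile_cons, hdb]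
      simp only [pvPairs, hemit, Bool.false_eq_true, if_false, List.nil_append]
      have hg : ([c] : List Char).getLastD ' ' = c := rfl
      rw [hg]
      exact pv_pairs_indep _ _ _ _ _ hne (by simp)

-- the productive case: a lowercase run right after a pending uppercase char
theorem pv_lower_after_upper (c : Char) (cs : List Char) (u : Char)
    (h : PySem.Chars.islower c = true) :
    pvPairs 'U' u (pvRuns (c :: cs)) =
      String.ofList (u :: c :: cs.takeWhile PySem.Chars.islower) ::
        pvPairs 'O' ' ' (pvRuns (cs.dropWhile PySem.Chars.islower)) := by
  rw [pvRuns]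
  simp only [pvCls_lower c h, pv_pred_L, pvPairs]
  simp only [beq_self_eq_true, Bool.and_self, if_true, List.singleton_append,
    List.cons.injEq, true_and]
  exact pv_pairs_indep _ _ _ _ _ (by simp) (by simp)

-- A's loop-plus-final-check, as a function of the starting state
def pvRun (vs : List String) (cur : List Char) (cs : List Char) : List String :=
  pvFinA (cs.foldl pvStepA (vs, cur))

theorem pvRun_cons (vs : List String) (cur : List Char) (c : Char) (cs : List Char) :
    pvRun vs cur (c :: cs) = pvRun (pvStepA (vs, cur) c).1 (pvStepA (vs, cur) c).2 cs := by
  simp [pvRun, List.foldl_cons]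

-- the invariant: A's machine, started in each of its three reachable state shapes,
-- computes B's run-pairing of the remaining input
theorem pv_main (cs : List Char) :
    (∀ vs, pvRun vs [] cs = vs ++ pvPairs 'O' ' ' (pvRuns cs)) ∧
    (∀ vs u, PySem.Chars.isupper u = true →
        pvRun vs [u] cs = vs ++ pvPairs 'U' u (pvRuns cs)) ∧
    (∀ vs u ls, PySem.Chars.isupper u = true → ls ≠ [] →
        pvRun vs (u :: ls) cs =
          vs ++ String.ofList (u :: (ls ++ cs.takeWhile PySem.Chars.islower)) ::
            pvPairs 'O' ' ' (pvRuns (cs.dropWhile PySem.Chars.islower))) := by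
  induction cs with
  | nil =>
    refine ⟨?_, ?_, ?_⟩
    · intro vs; simp [pvRun, pvFinA, pvPairs, pvRuns]
    · intro vs u _; simp [pvRun, pvFinA, pvPairs, pvRuns]
    · intro vs u ls _ hne
      have hlen : (u :: ls).length > 1 := by
        cases ls with
        | nil => exact absurd rfl hne
        | cons a l => simp
      simp [pvRun, pvFinA, pvPairs, pvRuns, hne]
  | cons c cs' ih =>
    obtain ⟨ih1, ih2, ih3⟩ := ih
    refine ⟨?_, ?_, ?_⟩
    · intro vs
      by_cases hU : PySem.Chars.isupper c = true
      · rw [pvRun_cons]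
        rw [show (pvStepA (vs, ([] : List Char)) c) = (vs, [c]) by simp [pvStepA, hU]]
        rw [ih2 vs c hU, pv_upper_step c cs' 'O' ' ' hU]
      · have hU' : PySem.Chars.isupper c = false := by simpa using hU
        rw [pvRun_cons]
        rw [show (pvStepA (vs, ([] : List Char)) c) = (vs, ([] : List Char)) by
          simp [pvStepA, hU']]
        rw [ih1 vs]
        have hcls : pvCls c ≠ 'U' := by
          by_cases hL : PySem.Chars.islower c = true
          · rw [pvCls_lower c hL]; decide
          · rw [pvCls_other c hU' (by simpa using hL)]; decide
        rw [pv_skip c cs' 'O' ' ' hcls (fun _ => by decide)]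
    · intro vs u hu
      by_cases hU : PySem.Chars.isupper c = true
      · rw [pvRun_cons]
        rw [show (pvStepA (vs, [u]) c) = (vs, [c]) by
          simp [pvStepA, hU, pv_upper_not_lower c hU]]
        rw [ih2 vs c hU, pv_upper_step c cs' 'U' u hU]
      · have hU' : PySem.Chars.isupper c = false := by simpa using hU
        by_cases hL : PySem.Chars.islower c = true
        · rw [pvRun_cons]
          rw [show (pvStepA (vs, [u]) c) = (vs, [u, c]) by
            simp [pvStepA, hU', hL]]
          rw [ih3 vs u [c] hu (by simp)]
          rw [pv_lower_after_upper c cs' u hL]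
          simp
        · have hL' : PySem.Chars.islower c = false := by simpa using hL
          rw [pvRun_cons]
          rw [show (pvStepA (vs, [u]) c) = (vs, ([] : List Char)) by
            simp [pvStepA, hU', hL']]
          rw [ih1 vs]
          rw [pv_skip c cs' 'U' u (by rw [pvCls_other c hU' hL']; decide)
            (by rw [pvCls_other c hU' hL']; intro h; cases h)]
    · intro vs u ls hu hne
      have hlen : (u :: ls).length > 1 := by
        cases ls with
        | nil => exact absurd rfl hne
        | cons a l => simp
      by_cases hL : PySem.Chars.islower c = true
      · rw [pvRun_cons]
        rw [show (pvStepA (vs, u :: ls) c) = (vs, u :: (ls ++ [c])) by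
          simp [pvStepA, hL]]
        rw [ih3 vs u (ls ++ [c]) hu (by simp)]
        simp [hL]
      · have hL' : PySem.Chars.islower c = false := by simpa using hL
        by_cases hU : PySem.Chars.isupper c = true
        · rw [pvRun_cons]
          rw [show (pvStepA (vs, u :: ls) c) = (vs ++ [String.ofList (u :: ls)], [c]) by
            simp [pvStepA, hU, hL', hne]]
          rw [ih2 _ c hU]
          rw [List.takeWhile_cons, List.dropWhile_cons]
          simp only [hL', Bool.false_eq_true, if_false]
          rw [pv_upper_step c cs' 'O' ' ' hU]
          simp
        · have hU' : PySem.Chars.isupper c = false := by simpa using hU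
          rw [pvRun_cons]
          rw [show (pvStepA (vs, u :: ls) c) = (vs ++ [String.ofList (u :: ls)], ([] : List Char)) by
            simp [pvStepA, hU', hL', hne]]
          rw [ih1 _]
          rw [List.takeWhile_cons, List.dropWhile_cons]
          simp only [hL', Bool.false_eq_true, if_false]
          rw [pv_skip c cs' 'O' ' ' (by rw [pvCls_other c hU' hL']; decide)
            (fun _ => by decide)]
          simp

-- ===== VERDICT (by name: the statement is the Claim_ definition above) =====
theorem find_upper_lower_sequences_spec : Claim_equal_find_upper_lower_sequences := by
  intro s _
  show find_upper_lower_sequences s = find_upper_lower_sequences_alt s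
  have h := (pv_main s.toList).1 []
  simpa [pvRun, find_upper_lower_sequences, find_upper_lower_sequences_alt] using h
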